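-- pv_equiv track=rewrite | github.com/NeedtoLearn/codejam | 2019/1a/a.py | find_A
-- ===== SOURCE A (Python) =====
-- def find_A(N):
--     A, idx = 0, 0
--     while N > 0:
--         if N % 10 == 4:
--             A += 10 ** idx
--         N //= 10
--         idx += 1
--     return A
-- ===== SOURCE B (Python) =====
-- def find_A(N):
--     # String-based: walk the decimal representation most-significant-first,
--     # Horner-accumulating 1 for each '4' digit and 0 otherwise.
--     if N <= 0:
--         return 0
--     a = 0
--     for c in str(N):
--         a = a * 10 + (1 if c == '4' else 0)
--     return a
-- ===== Notes on version B (the rewrite author's own statement) =====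
-- stated objective: idiomatic
-- what changed: Replaces the arithmetic LSD-first digit-extraction loop with running powers of ten by a most-significant-first Horner fold over str(N), accumulating an indicator of whether each character is the digit four.
import Mathlib
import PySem

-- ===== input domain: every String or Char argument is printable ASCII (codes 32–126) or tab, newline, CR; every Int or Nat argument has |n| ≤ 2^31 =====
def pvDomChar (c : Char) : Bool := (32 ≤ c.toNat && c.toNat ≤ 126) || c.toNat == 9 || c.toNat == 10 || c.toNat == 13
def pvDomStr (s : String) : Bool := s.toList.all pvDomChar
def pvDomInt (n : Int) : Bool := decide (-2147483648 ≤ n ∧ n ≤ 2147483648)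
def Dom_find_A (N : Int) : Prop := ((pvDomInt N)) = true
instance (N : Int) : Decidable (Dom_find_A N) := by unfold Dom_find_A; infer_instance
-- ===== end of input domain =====

-- B replaces A's LSD-first arithmetic digit loop with running powers of ten by an
-- MSD-first Horner fold over the decimal string of N (idiomatic, same O(digits) cost).


-- ===== PORT A =====
-- the while loop: state (N, A, idx); `10 ** idx` is ported as `10 ^ idx.toNat`,
-- exact because idx starts at 0 and only increments, so idx ≥ 0 throughout.
def findAGo (N A idx : Int) : Int :=
  if h : N > 0 then
    findAGo (PySem.Int.floordiv N 10)
      (if PySem.Int.mod N 10 = 4 then A + 10 ^ idx.toNat else A) (idx + 1)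
  else A
termination_by N.toNat
decreasing_by
  have : PySem.Int.floordiv N 10 = N / 10 := by
    simp [PySem.Int.floordiv, Int.fdiv_eq_ediv]
  rw [this]; omega

def find_A (N : Int) : Int := findAGo N 0 0

-- ===== PORT B =====
def find_A_alt (N : Int) : Int :=
  if N ≤ 0 then 0
  else (PySem.Int.toStr N).toList.foldl
    (fun a c => a * 10 + (if c = '4' then 1 else 0)) 0

-- ===== PRECONDITION & SPEC =====
def Spec_find_A (N : Int) (out : Int) : Prop := out = find_A_alt N
instance (N : Int) (out : Int) : Decidable (Spec_find_A N out) := by unfold Spec_find_A; infer_instance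

-- ===== CLAIM (what is proved, stated in full; the proofs are below) =====
def Claim_equal_find_A : Prop := ∀ (N : Int), Dom_find_A N → Spec_find_A N (find_A N)

-- ===== LEMMAS AND PROOFS =====

-- common characterisation: the "indicator polynomial" of the digits of n
def gval (n : Nat) : Int :=
  if h : n = 0 then 0
  else (if n % 10 = 4 then 1 else 0) + 10 * gval (n / 10)
decreasing_by exact Nat.div_lt_self (Nat.pos_of_ne_zero h) (by norm_num)

-- big-endian digit characters of n (what Nat.toDigits 10 produces)
def dig (n : Nat) : List Char :=
  if n < 10 then [Nat.digitChar n]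
  else dig (n / 10) ++ [Nat.digitChar (n % 10)]
decreasing_by exact Nat.div_lt_self (by omega) (by norm_num)

lemma gval_eq (n : Nat) (h : n ≠ 0) :
    gval n = (if n % 10 = 4 then 1 else 0) + 10 * gval (n / 10) := by
  conv_lhs => rw [gval]
  rw [dif_neg h]

lemma dig_ge (n : Nat) (h : ¬ n < 10) :
    dig n = dig (n / 10) ++ [Nat.digitChar (n % 10)] := by
  conv_lhs => rw [dig]
  rw [if_neg h]

lemma toDigitsCore_eq_dig (fuel n : Nat) (acc : List Char) (hf : n < fuel) :
    Nat.toDigitsCore 10 fuel n acc = dig n ++ acc := by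
  induction fuel generalizing n acc with
  | zero => omega
  | succ f ih =>
    rw [Nat.toDigitsCore]
    by_cases h : n / 10 = 0
    · have hn : n < 10 := by omega
      rw [if_pos h, dig, if_pos hn]
      have : n % 10 = n := Nat.mod_eq_of_lt hn
      simp [this]
    · have hn : ¬ n < 10 := by omega
      rw [if_neg h, ih (n / 10) _ (by omega), dig_ge n hn]
      simp

lemma toDigits_eq_dig (n : Nat) : Nat.toDigits 10 n = dig n := by
  have := toDigitsCore_eq_dig (n + 1) n [] (by omega)
  simpa [Nat.toDigits] using this

lemma digitChar_eq_four_iff (n : Nat) (h : n < 10) : Nat.digitChar n = '4' ↔ n = 4 := by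
  interval_cases n <;> simp [Nat.digitChar]

lemma foldl_dig (n : Nat) : ∀ a : Int,
    (dig n).foldl (fun a c => a * 10 + (if c = '4' then 1 else 0)) a
      = a * 10 ^ (dig n).length + gval n := by
  induction n using Nat.strong_induction_on with
  | _ n ih =>
    intro a
    by_cases h : n < 10
    · rw [dig, if_pos h]
      rcases Nat.eq_zero_or_pos n with h0 | h0
      · subst h0; simp [gval, Nat.digitChar]
      · have hmod : n % 10 = n := Nat.mod_eq_of_lt h
        rw [gval, dif_neg (by omega)]
        have hz : n / 10 = 0 := Nat.div_eq_of_lt h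
        rw [hz, gval]
        simp only [List.foldl, List.length, digitChar_eq_four_iff n h, hmod]
        split_ifs <;> ring
    · rw [dig_ge n h]
      rw [List.foldl_append, ih (n / 10) (Nat.div_lt_self (by omega) (by norm_num)) a]
      simp only [List.foldl]
      rw [gval_eq n (by omega)]
      have h10 : n % 10 < 10 := Nat.mod_lt _ (by norm_num)
      simp only [digitChar_eq_four_iff _ h10]
      simp only [List.length_append, List.length]
      rw [pow_succ]
      split_ifs <;> ring

lemma findAGo_eq (m : Nat) : ∀ N A idx : Int, N.toNat = m → 0 ≤ idx →
    findAGo N A idx = A + 10 ^ idx.toNat * gval N.toNat := by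
  induction m using Nat.strong_induction_on with
  | _ m ih =>
    intro N A idx hm hidx
    rw [findAGo]
    by_cases h : N > 0
    · rw [dif_pos h]
      have hfd : PySem.Int.floordiv N 10 = N / 10 := by
        simp [PySem.Int.floordiv, Int.fdiv_eq_ediv]
      have hmd : PySem.Int.mod N 10 = N % 10 := by
        simp [PySem.Int.mod, Int.fmod_eq_emod]
      have htn : (N / 10).toNat = N.toNat / 10 := by omega
      have hlt : (N / 10).toNat < m := by omega
      rw [hfd, hmd, ih _ hlt (N / 10) _ (idx + 1) rfl (by omega), htn]
      have hpow : (10 : Int) ^ (idx + 1).toNat = 10 ^ idx.toNat * 10 := by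
        have : (idx + 1).toNat = idx.toNat + 1 := by omega
        rw [this, pow_succ]
      rw [hpow]
      rw [gval_eq N.toNat (by omega)]
      have hmm : N % 10 = (N.toNat % 10 : Nat) := by omega
      rw [hmm]
      have : ((N.toNat % 10 : Nat) : Int) = 4 ↔ N.toNat % 10 = 4 := by omega
      simp only [this]
      split_ifs <;> ring
    · rw [dif_neg h]
      have : N.toNat = 0 := by omega
      rw [this, gval]; simp

lemma toChars_pos (N : Int) (h : 0 < N) :
    PySem.Int.toChars N = dig N.toNat := by
  rw [PySem.Int.toChars, if_neg (by omega), toDigits_eq_dig]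

theorem find_A_eq_alt (N : Int) : find_A N = find_A_alt N := by
  unfold find_A find_A_alt
  by_cases h : N ≤ 0
  · rw [if_pos h, findAGo, dif_neg (by omega)]
  · rw [if_neg h]
    rw [findAGo_eq N.toNat N 0 0 rfl (le_refl 0)]
    rw [PySem.Int.toList_toStr, toChars_pos N (by omega), foldl_dig]
    simp

-- ===== VERDICT (by name: the statement is the Claim_ definition above) =====
theorem find_A_spec : Claim_equal_find_A := by
  intro N _
  unfold Spec_find_A
  exact find_A_eq_alt N
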